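-- pv_equiv track=rewrite | github.com/tobiw/pix3_gallery | pix3_gallery/pix.py | _get_breadcrums
-- ===== SOURCE A (Python) =====
-- def _get_breadcrums(album_name):
--     """
--     >>> Pix._get_breadcrums('')
--     []
--     >>> Pix._get_breadcrums('test_abc')
--     [('test abc': '/album/test_abc')]
--     >>> Pix._get_breadcrums('test_abc/xyz')
--     [('xyz': '/album/test_abc/xyz'), ('test abc': '/album/test_abc')]
--     """
--     names = album_name.split('/')
--     if not names or not names[0]:
--         return []
--
--     links = ['/album']  # initialize with URL base
--     for w in names:
--         links.append('{:s}/{:s}'.format(links[-1], w))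
--     del links[0]  # drop first item "/album"
--
--     assert len(names) == len(links), 'len(names) [{}] != len(links) [{}]'.format(len(names), len(links))
--     return zip([n.replace('_', ' ') for n in names], links)
-- ===== SOURCE B (Python) =====
-- def _get_breadcrums(album_name):
--     names = album_name.split('/')
--     if not names or not names[0]:
--         return []
--     return zip((n.replace('_', ' ') for n in names),
--                ('/album/' + '/'.join(names[:i + 1]) for i in range(len(names))))
-- ===== Notes on version B (the rewrite author's own statement) =====
-- stated objective: simpler
-- what changed: Replaced A's stateful link accumulator (append the previous link plus the next segment, then delete the base element and assert lengths) by computing each breadcrumb URL independently as the URL base plus the slash-join of the first i+1 path segments, inside the zip.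
import Mathlib
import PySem

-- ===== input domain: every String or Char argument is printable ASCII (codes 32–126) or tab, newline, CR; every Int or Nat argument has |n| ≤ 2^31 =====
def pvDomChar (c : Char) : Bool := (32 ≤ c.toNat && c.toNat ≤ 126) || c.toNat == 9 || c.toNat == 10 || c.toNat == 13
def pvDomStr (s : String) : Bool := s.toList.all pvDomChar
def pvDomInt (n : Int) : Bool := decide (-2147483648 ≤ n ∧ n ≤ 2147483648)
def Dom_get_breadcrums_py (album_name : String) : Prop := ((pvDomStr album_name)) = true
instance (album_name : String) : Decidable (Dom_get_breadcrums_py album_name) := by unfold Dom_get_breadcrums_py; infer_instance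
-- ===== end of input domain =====

-- ===== PORT A =====
-- B builds each breadcrumb URL independently from a prefix join instead of threading
-- A's last-link accumulator; objective: simpler (no accumulator list, no del/assert).

-- the loop `for w in names: links.append(links[-1] + '/' + w)` over the links list
def get_breadcrums_py (album_name : String) : List (String × String) :=
  -- '/' is a nonempty separator, so split? never returns none
  let names := (PySem.Str.split? album_name "/").getD []
  if names = [] ∨ names.head?.getD "" = "" then []
  else
    let links := names.foldl (fun ls w => ls ++ [ls.getLast! ++ "/" ++ w]) ["/album"]
    let links := links.drop 1   -- del links[0]
    -- the assert always holds and is dropped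
    List.zip (names.map fun n => PySem.Str.replace n "_" " ") links

-- ===== PORT B =====
def get_breadcrums_py_alt (album_name : String) : List (String × String) :=
  let names := (PySem.Str.split? album_name "/").getD []
  if names = [] ∨ names.head?.getD "" = "" then []
  else
    List.zip (names.map fun n => PySem.Str.replace n "_" " ")
      -- names[:i+1] = names.take (i+1) since i+1 ≥ 0
      ((List.range names.length).map fun i =>
        "/album/" ++ PySem.Str.join "/" (names.take (i + 1)))

-- ===== PRECONDITION & SPEC =====
def Spec_get_breadcrums_py (album_name : String) (out : List (String × String)) : Prop := out = get_breadcrums_py_alt album_name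
instance (album_name : String) (out : List (String × String)) : Decidable (Spec_get_breadcrums_py album_name out) := by unfold Spec_get_breadcrums_py; infer_instance

-- ===== CLAIM (what is proved, stated in full; the proofs are below) =====
def Claim_equal_get_breadcrums_py : Prop := ∀ (album_name : String), Dom_get_breadcrums_py album_name → Spec_get_breadcrums_py album_name (get_breadcrums_py album_name)

-- ===== LEMMAS AND PROOFS =====

-- the chain of links A's loop appends, starting from the current last link
def pvChain : String → List String → List String
  | _, [] => []
  | last, w :: ws => (last ++ "/" ++ w) :: pvChain (last ++ "/" ++ w) ws

theorem pv_getLast!_concat (l : List String) (a : String) : (l ++ [a]).getLast! = a := by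
  simp [List.getLast!_eq_getLast?_getD]

theorem pv_foldl_chain (ws : List String) (acc : List String) (last : String) :
    ws.foldl (fun ls w => ls ++ [ls.getLast! ++ "/" ++ w]) (acc ++ [last])
      = acc ++ [last] ++ pvChain last ws := by
  induction ws generalizing acc last with
  | nil => simp [pvChain]
  | cons w ws ih =>
    simp only [List.foldl_cons, pvChain, pv_getLast!_concat]
    rw [show acc ++ [last] ++ [last ++ "/" ++ w] = (acc ++ [last]) ++ [last ++ "/" ++ w] from rfl,
        ih]
    simp

theorem pv_join_cons (w : String) (l : List String) (h : l ≠ []) :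
    PySem.Str.join "/" (w :: l) = w ++ "/" ++ PySem.Str.join "/" l := by
  match l, h with
  | b :: t, _ =>
    apply String.toList_injective
    simp [PySem.Str.toList_join, PySem.Chars.join_cons_cons]

theorem pv_chain_eq_prefix (ws : List String) (base : String) :
    pvChain base ws
      = (List.range ws.length).map
          (fun i => base ++ "/" ++ PySem.Str.join "/" (ws.take (i + 1))) := by
  induction ws generalizing base with
  | nil => simp [pvChain]
  | cons w ws ih =>
    simp only [pvChain, List.length_cons, List.range_succ_eq_map, List.map_cons,
      List.map_map]
    refine List.cons_eq_cons.mpr ⟨?_, ?_⟩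
    · simp [PySem.Str.join]
    · rw [ih (base ++ "/" ++ w)]
      apply List.map_congr_left
      intro i hi
      simp only [Function.comp_apply, Nat.succ_eq_add_one, List.take_succ_cons]
      rw [pv_join_cons w (ws.take (i + 1))
            (by simp [List.mem_range] at hi; exact List.ne_nil_of_length_pos (by simpa using Nat.lt_of_lt_of_le (Nat.zero_lt_succ i) (Nat.succ_le_of_lt hi)))]
      rw [← String.append_assoc, ← String.append_assoc]

theorem pv_album_slash (x : String) : "/album" ++ "/" ++ x = "/album/" ++ x := by
  rw [String.append_assoc]; rfl

-- ===== VERDICT (by name: the statement is the Claim_ definition above) =====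
theorem get_breadcrums_py_spec : Claim_equal_get_breadcrums_py := by
  intro album_name _
  unfold Spec_get_breadcrums_py get_breadcrums_py get_breadcrums_py_alt
  simp only []
  set names := (PySem.Str.split? album_name "/").getD [] with hn
  by_cases h : names = [] ∨ names.head?.getD "" = ""
  · simp [h]
  · simp only [h, reduceIte]
    congr 1
    have h1 := pv_foldl_chain names [] "/album"
    simp only [List.nil_append] at h1
    rw [h1, List.singleton_append, List.drop_one, List.tail_cons, pv_chain_eq_prefix]
    apply List.map_congr_left
    intro i _
    exact pv_album_slash _
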